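-- pv_equiv track=rewrite | github.com/nickhealthy/python-algorithm | 프로그래머스/unrated/181890. 왼쪽 오른쪽/왼쪽 오른쪽.py | solution
-- ===== SOURCE A (Python) =====
-- def solution(str_list):
--     answer = []
--
--     for i in range(len(str_list)):
--         if str_list[i] == 'l':
--             return str_list[:i] if str_list[:i] else []
--         elif str_list[i] == 'r':
--             return str_list[i + 1:] if str_list[i + 1:] else []
--
--
--     return []
-- ===== SOURCE B (Python) =====
-- def solution(str_list):
--     n = len(str_list)
--     li = str_list.index('l') if 'l' in str_list else n
--     ri = str_list.index('r') if 'r' in str_list else n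
--     if li == n and ri == n:
--         return []
--     if li < ri:
--         return str_list[:li]
--     return str_list[ri + 1:]
-- ===== Notes on version B (the rewrite author's own statement) =====
-- stated objective: alternative
-- what changed: B replaces A's single index loop with early returns by a compute-then-decide shape: it locates the first 'l' and first 'r' with list.index (defaulting to the length), then compares the two positions to pick the prefix, the suffix, or the empty result.
import Mathlib
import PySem

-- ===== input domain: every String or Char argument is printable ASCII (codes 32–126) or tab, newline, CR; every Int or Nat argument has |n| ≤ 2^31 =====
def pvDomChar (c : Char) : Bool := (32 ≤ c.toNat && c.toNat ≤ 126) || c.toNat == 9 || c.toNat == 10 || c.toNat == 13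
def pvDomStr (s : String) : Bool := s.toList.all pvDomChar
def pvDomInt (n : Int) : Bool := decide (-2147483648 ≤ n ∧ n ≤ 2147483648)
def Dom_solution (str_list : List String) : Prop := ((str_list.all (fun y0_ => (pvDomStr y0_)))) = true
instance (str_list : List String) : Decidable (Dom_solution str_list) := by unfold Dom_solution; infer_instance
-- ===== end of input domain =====

-- B computes the first positions of 'l' and of 'r' up front and decides from them,
-- instead of A's index loop with early returns; same O(n) cost (objective: alternative).

-- ===== PORT A =====
-- the for-loop with early returns, as recursion on the index i
def solutionGo (str_list : List String) (i : Nat) : List String :=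
  if h : i < str_list.length then
    if str_list[i] = "l" then
      if PySem.List.slice str_list none (some (i : Int)) ≠ [] then
        PySem.List.slice str_list none (some (i : Int))
      else []
    else if str_list[i] = "r" then
      if PySem.List.slice str_list (some ((i : Int) + 1)) none ≠ [] then
        PySem.List.slice str_list (some ((i : Int) + 1)) none
      else []
    else solutionGo str_list (i + 1)
  else []
termination_by str_list.length - i

def solution (str_list : List String) : List String :=
  solutionGo str_list 0

-- ===== PORT B =====
def solution_alt (str_list : List String) : List String :=
  let n := str_list.length
  let li := (PySem.List.index? str_list "l").getD n
  let ri := (PySem.List.index? str_list "r").getD n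
  if li = n ∧ ri = n then []
  else if li < ri then PySem.List.slice str_list none (some (li : Int))
  else PySem.List.slice str_list (some ((ri : Int) + 1)) none

-- ===== PRECONDITION & SPEC =====
def Spec_solution (str_list : List String) (out : List String) : Prop := out = solution_alt str_list
instance (str_list : List String) (out : List String) : Decidable (Spec_solution str_list out) := by unfold Spec_solution; infer_instance

-- ===== CLAIM (what is proved, stated in full; the proofs are below) =====
def Claim_equal_solution : Prop := ∀ (str_list : List String), Dom_solution str_list → Spec_solution str_list (solution str_list)

-- ===== LEMMAS AND PROOFS =====

theorem ite_ne_nil (p : List String) : (if p ≠ [] then p else []) = p := by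
  split_ifs with h
  · rfl
  · simp at h; exact h.symm

-- if v is not in the first i elements and sits at i, its first index is i
theorem index?_of_first {l : List String} {v : String} {i : Nat} (hi : i < l.length)
    (hpre : v ∉ l.take i) (hv : l[i] = v) : PySem.List.index? l v = some i := by
  rw [PySem.List.index?_eq_some_iff]
  refine ⟨l.take i, l.drop (i + 1), ?_, by simp [Nat.min_eq_left hi.le], hpre⟩
  conv_lhs => rw [← List.take_append_drop i l]
  rw [List.drop_eq_getElem_cons hi, hv]

-- if v is not in the first i+1 elements, its first index (if any) exceeds i
theorem index?_gt {l : List String} {v : String} {i k : Nat}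
    (hpre : v ∉ l.take (i + 1)) (hk : PySem.List.index? l v = some k) : i < k := by
  obtain ⟨hkl, hget, -⟩ := PySem.List.getElem_of_index?_eq_some hk
  by_contra h
  push_neg at h
  exact hpre (by
    have : k < i + 1 := Nat.lt_succ_of_le h
    exact List.mem_take_iff_getElem.mpr ⟨k, by omega, by simpa [hget] ⟩)

theorem notmem_take_succ (l : List String) (v : String) (i : Nat)
    (hv : v ∉ List.take i l) (h : i < l.length) (hL : ¬l[i] = v) :
    v ∉ List.take (i + 1) l := by
  intro hm
  rcases List.mem_take_iff_getElem.mp hm with ⟨k, hk, he⟩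
  rcases Nat.lt_or_ge k i with hki | hki
  · exact hv (List.mem_take_iff_getElem.mpr ⟨k, by omega, he⟩)
  · have hki' : k = i := by omega
    subst hki'
    exact hL he

theorem go_eq (l : List String) (i : Nat)
    (hl : "l" ∉ l.take i) (hr : "r" ∉ l.take i) :
    solutionGo l i = solution_alt l := by
  unfold solutionGo
  by_cases h : i < l.length
  · simp only [h, dif_pos]
    by_cases hL : l[i] = "l"
    · have hidx : PySem.List.index? l "l" = some i := index?_of_first h hl hL
      have hrgt : ∀ k, PySem.List.index? l "r" = some k → i < k := by
        intro k hk
        apply index?_gt _ hk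
        rw [List.take_succ]
        simp [hr, List.getElem?_eq_getElem h, hL]
      simp only [if_pos hL, ite_ne_nil]
      rw [solution_alt, PySem.List.slice_to_natCast]
      have hli : (PySem.List.index? l "l").getD l.length = i := by rw [hidx]; rfl
      have hri : i < (PySem.List.index? l "r").getD l.length := by
        cases hc : PySem.List.index? l "r" with
        | none => simpa using h
        | some k => simpa using hrgt k hc
      simp only [hli]
      rw [if_neg (by omega), if_pos hri, PySem.List.slice_to_natCast]
    · by_cases hR : l[i] = "r"
      · have hidx : PySem.List.index? l "r" = some i := index?_of_first h hr hR
        have hlgt : ∀ k, PySem.List.index? l "l" = some k → i < k := by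
          intro k hk
          apply index?_gt _ hk
          rw [List.take_succ]
          simp [hl, List.getElem?_eq_getElem h, hR]
        simp only [if_neg hL, if_pos hR, ite_ne_nil]
        rw [solution_alt]
        have hri : (PySem.List.index? l "r").getD l.length = i := by rw [hidx]; rfl
        have hli : i < (PySem.List.index? l "l").getD l.length := by
          cases hc : PySem.List.index? l "l" with
          | none => simpa using h
          | some k => simpa using hlgt k hc
        simp only [hri]
        rw [if_neg (by omega), if_neg (by omega)]
      · rw [if_neg hL, if_neg hR]
        apply go_eq l (i + 1)
        · exact notmem_take_succ l "l" i hl h hL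
        · exact notmem_take_succ l "r" i hr h hR
  · simp only [h]
    have hle : l.length ≤ i := Nat.le_of_not_lt h
    rw [List.take_of_length_le hle] at hl hr
    have hLn : PySem.List.index? l "l" = none := (PySem.List.index?_eq_none_iff l "l").mpr hl
    have hRn : PySem.List.index? l "r" = none := (PySem.List.index?_eq_none_iff l "r").mpr hr
    rw [solution_alt, hLn, hRn]
    simp
termination_by l.length - i

-- ===== VERDICT (by name: the statement is the Claim_ definition above) =====
theorem solution_spec : Claim_equal_solution := by
  intro l _
  show solution l = solution_alt l
  exact go_eq l 0 (by simp) (by simp)
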